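-- pv_equiv track=rewrite | github.com/gabehenreal/TXBtool | median_cut_alpha.py | obtaineightmorefromthisbin
-- ===== SOURCE A (Python) =====
-- def obtaineightmorefromthisbin(colorbin):
--     ## this couldve been written a bit better....
--     sorted_bin = colorbin
--     morebins = [sorted_bin[:len(sorted_bin)//2],sorted_bin[len(sorted_bin)//2:] ]
--
--     while len(morebins) < 8:
--         temp = []
--         for i in morebins:
--             s_i = i
--             temp.append(s_i[:len(s_i)//2])
--             temp.append(s_i[len(s_i)//2:])
--         morebins.clear()
--         for k in temp:
--             morebins.append(k)
--
--     exp = []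
--     for i in range(8):
--         bin_alt = morebins[i]
--         tot_r = 0
--         tot_g = 0
--         tot_b = 0
--         tot_a = 0
--         for j in bin_alt:
--             tot_r += j[0]
--             tot_g += j[1]
--             tot_b += j[2]
--             tot_a += j[3]
--         if len(bin_alt) != 0:
--             centroid = ( tot_r//len(bin_alt), tot_g//len(bin_alt), tot_b//len(bin_alt) ,tot_a//len(bin_alt))
--         else:
--             centroid = ( tot_r//1, tot_g//1, tot_b//1 ,tot_a//1)
--         exp.append(centroid)
--
--     return exp
-- ===== SOURCE B (Python) =====
-- def obtaineightmorefromthisbin(colorbin):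
--     def split(lst, k):
--         if k <= 1:
--             return [lst]
--         m = len(lst) // 2
--         return split(lst[:m], k // 2) + split(lst[m:], k // 2)
--
--     def centroid(b):
--         n = len(b) or 1
--         return (sum(p[0] for p in b) // n,
--                 sum(p[1] for p in b) // n,
--                 sum(p[2] for p in b) // n,
--                 sum(p[3] for p in b) // n)
--
--     return [centroid(b) for b in split(colorbin, 8)]
-- ===== Notes on version B (the rewrite author's own statement) =====
-- stated objective: simpler
-- what changed: Replaced the level-by-level while-loop rebuild of the bin list and the per-bin four-accumulator loop with a recursive divide-and-conquer split (count halving) and per-channel sums in a comprehension.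
import Mathlib
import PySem

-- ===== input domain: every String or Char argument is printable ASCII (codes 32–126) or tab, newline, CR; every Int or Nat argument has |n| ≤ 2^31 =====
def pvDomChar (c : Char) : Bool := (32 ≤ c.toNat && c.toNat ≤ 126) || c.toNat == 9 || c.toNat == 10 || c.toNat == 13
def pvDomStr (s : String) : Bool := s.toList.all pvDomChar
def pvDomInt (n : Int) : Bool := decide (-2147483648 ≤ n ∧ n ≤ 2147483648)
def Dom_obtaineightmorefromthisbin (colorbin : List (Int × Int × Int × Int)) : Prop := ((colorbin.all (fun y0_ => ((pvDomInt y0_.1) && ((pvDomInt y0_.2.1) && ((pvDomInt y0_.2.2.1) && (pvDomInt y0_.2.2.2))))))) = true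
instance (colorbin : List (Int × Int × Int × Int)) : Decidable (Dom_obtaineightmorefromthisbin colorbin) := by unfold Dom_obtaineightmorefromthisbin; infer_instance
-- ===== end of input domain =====

-- B replaces A's level-by-level while-loop rebuild and four-accumulator centroid loop by a
-- recursive divide-and-conquer split and per-channel sums, for a simpler decomposition (same cost).



-- ===== PORT A =====
-- one split pass of the while-loop body: temp gathers each bin's two halves
def pvStepA (bins : List (List (Int × Int × Int × Int))) : List (List (Int × Int × Int × Int)) :=
  bins.foldl (fun temp i => temp ++ [i.take (i.length / 2), i.drop (i.length / 2)]) []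

-- the while-loop, with fuel making it total (A's loop runs exactly twice: 2 → 4 → 8 bins)
def pvLoopA : Nat → List (List (Int × Int × Int × Int)) → List (List (Int × Int × Int × Int))
  | 0, bins => bins
  | n + 1, bins => if bins.length < 8 then pvLoopA n (pvStepA bins) else bins

-- per-bin centroid: the four running totals, then the branch on emptiness
def pvCentroidA (binAlt : List (Int × Int × Int × Int)) : Int × Int × Int × Int :=
  let t := binAlt.foldl
    (fun (t : Int × Int × Int × Int) j => (t.1 + j.1, t.2.1 + j.2.1, t.2.2.1 + j.2.2.1, t.2.2.2 + j.2.2.2))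
    (0, 0, 0, 0)
  if binAlt.length ≠ 0 then
    (PySem.Int.floordiv t.1 binAlt.length, PySem.Int.floordiv t.2.1 binAlt.length,
     PySem.Int.floordiv t.2.2.1 binAlt.length, PySem.Int.floordiv t.2.2.2 binAlt.length)
  else
    (PySem.Int.floordiv t.1 1, PySem.Int.floordiv t.2.1 1,
     PySem.Int.floordiv t.2.2.1 1, PySem.Int.floordiv t.2.2.2 1)

def obtaineightmorefromthisbin (colorbin : List (Int × Int × Int × Int)) : List (Int × Int × Int × Int) :=
  let sortedBin := colorbin
  let morebins := [sortedBin.take (sortedBin.length / 2), sortedBin.drop (sortedBin.length / 2)]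
  let morebins := pvLoopA 8 morebins
  -- for i in range(8): exp.append(centroid(morebins[i])); morebins always has 8 entries,
  -- the .getD [] only makes the indexing total
  (List.range 8).foldl (fun exp i => exp ++ [pvCentroidA ((PySem.List.pyGet? morebins i).getD [])]) []


-- ===== PORT B =====
-- recursive divide-and-conquer split into k contiguous bins (k a power of two)
def pvSplitB (lst : List (Int × Int × Int × Int)) (k : Nat) : List (List (Int × Int × Int × Int)) :=
  if k ≤ 1 then [lst]
  else
    let m := lst.length / 2
    pvSplitB (lst.take m) (k / 2) ++ pvSplitB (lst.drop m) (k / 2)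

-- centroid as four per-channel sums divided by max(len, 1)
def pvCentroidB (b : List (Int × Int × Int × Int)) : Int × Int × Int × Int :=
  let n : Int := if b.length = 0 then 1 else b.length
  (PySem.Int.floordiv (b.map (fun p : Int × Int × Int × Int => p.1)).sum n,
   PySem.Int.floordiv (b.map (fun p : Int × Int × Int × Int => p.2.1)).sum n,
   PySem.Int.floordiv (b.map (fun p : Int × Int × Int × Int => p.2.2.1)).sum n,
   PySem.Int.floordiv (b.map (fun p : Int × Int × Int × Int => p.2.2.2)).sum n)

def obtaineightmorefromthisbin_alt (colorbin : List (Int × Int × Int × Int)) : List (Int × Int × Int × Int) :=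
  (pvSplitB colorbin 8).map pvCentroidB

-- ===== PRECONDITION & SPEC =====
def Spec_obtaineightmorefromthisbin (colorbin : List (Int × Int × Int × Int)) (out : List (Int × Int × Int × Int)) : Prop := out = obtaineightmorefromthisbin_alt colorbin
instance (colorbin : List (Int × Int × Int × Int)) (out : List (Int × Int × Int × Int)) : Decidable (Spec_obtaineightmorefromthisbin colorbin out) := by unfold Spec_obtaineightmorefromthisbin; infer_instance

-- ===== CLAIM (what is proved, stated in full; the proofs are below) =====
def Claim_equal_obtaineightmorefromthisbin : Prop := ∀ (colorbin : List (Int × Int × Int × Int)), Dom_obtaineightmorefromthisbin colorbin → Spec_obtaineightmorefromthisbin colorbin (obtaineightmorefromthisbin colorbin)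

-- ===== LEMMAS AND PROOFS =====

-- A's four-accumulator fold computes the four per-channel sums
theorem pvFoldA_eq (bin : List (Int × Int × Int × Int)) (r g b a : Int) :
    bin.foldl
      (fun (t : Int × Int × Int × Int) j => (t.1 + j.1, t.2.1 + j.2.1, t.2.2.1 + j.2.2.1, t.2.2.2 + j.2.2.2))
      (r, g, b, a)
    = (r + (bin.map (fun p => p.1)).sum, g + (bin.map (fun p => p.2.1)).sum,
       b + (bin.map (fun p => p.2.2.1)).sum, a + (bin.map (fun p => p.2.2.2)).sum) := by
  induction bin generalizing r g b a with
  | nil => simp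
  | cons h t ih => simp [List.foldl, ih, add_assoc]

-- the two centroid computations agree on every bin
theorem pvCentroid_eq (bin : List (Int × Int × Int × Int)) :
    pvCentroidA bin = pvCentroidB bin := by
  unfold pvCentroidA pvCentroidB
  rw [pvFoldA_eq]
  by_cases h : bin.length = 0 <;> simp [h]

theorem pv_main (c : List (Int × Int × Int × Int)) :
    obtaineightmorefromthisbin c = obtaineightmorefromthisbin_alt c := by
  unfold obtaineightmorefromthisbin obtaineightmorefromthisbin_alt
  simp [pvLoopA, pvStepA, pvSplitB, List.range_succ, PySem.List.pyGet?, PySem.List.pyIdx?,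
    pvCentroid_eq]

-- ===== VERDICT (by name: the statement is the Claim_ definition above) =====
theorem obtaineightmorefromthisbin_spec : Claim_equal_obtaineightmorefromthisbin := by
  intro c _
  unfold Spec_obtaineightmorefromthisbin
  exact pv_main c
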